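-- pv_equiv track=rewrite | github.com/jamesben6688/coding | heap/delete_k_large_num.py | remove_k_largest_optimized
-- ===== SOURCE A (Python) =====
-- import heapq
-- from collections import Counter
--
-- def remove_k_largest_optimized(nums, k):
--     if k == 0:
--         return len(nums)
--
--     # 找出最大的 k 个数
--     k_largest = heapq.nlargest(k, nums)
--
--     # 统计这 k 个数的出现次数（有可能有重复值）
--     remove_counter = Counter(k_largest)
--
--     # 遍历原数组，跳过这些要删除的数
--     remaining = 0
--     for num in nums:
--         if num not in remove_counter:
--             remaining += 1
--
--     return remaining
-- ===== SOURCE B (Python) =====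
-- def _kth_largest(nums, k):
--     # value of the k-th largest element (1-indexed, with duplicates), 1 <= k <= len(nums)
--     pivot = nums[len(nums) // 2]
--     gt = [x for x in nums if x > pivot]
--     if k <= len(gt):
--         return _kth_largest(gt, k)
--     eq_count = sum(1 for x in nums if x == pivot)
--     if k <= len(gt) + eq_count:
--         return pivot
--     lt = [x for x in nums if x < pivot]
--     return _kth_largest(lt, k - len(gt) - eq_count)
--
--
-- def remove_k_largest_optimized(nums, k):
--     if k <= 0:
--         return len(nums)
--     if k >= len(nums):
--         return 0
--     t = _kth_largest(nums, k)  # quickselect: the k-th largest value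
--     return sum(1 for x in nums if x < t)
-- ===== Notes on version B (the rewrite author's own statement) =====
-- stated objective: faster
-- what changed: Replaces the heap-based nlargest + Counter membership scan by a quickselect of the k-th largest value followed by a single count of elements strictly below it (with closed-form answers for k<=0 and k>=len).
import Mathlib
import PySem

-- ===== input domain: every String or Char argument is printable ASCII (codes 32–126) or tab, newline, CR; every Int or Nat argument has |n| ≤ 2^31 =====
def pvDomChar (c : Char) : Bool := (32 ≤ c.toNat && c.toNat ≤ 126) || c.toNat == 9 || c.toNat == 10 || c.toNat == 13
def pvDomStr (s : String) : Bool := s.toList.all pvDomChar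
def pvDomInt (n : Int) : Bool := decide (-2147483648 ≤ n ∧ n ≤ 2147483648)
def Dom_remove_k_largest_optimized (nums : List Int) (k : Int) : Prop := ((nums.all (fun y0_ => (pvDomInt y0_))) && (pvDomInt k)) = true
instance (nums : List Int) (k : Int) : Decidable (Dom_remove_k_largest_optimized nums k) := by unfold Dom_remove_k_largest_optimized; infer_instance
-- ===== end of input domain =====

-- B replaces heapq.nlargest + Counter membership by a quickselect of the k-th largest value and a
-- single count of the elements strictly below it; a timing run measured the speed-up.


-- ===== PORT A =====
def remove_k_largest_optimized (nums : List Int) (k : Int) : Int :=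
  if k = 0 then (nums.length : Int)
  else
    -- heapq.nlargest(k, nums) = sorted(nums, reverse=True)[:k]  (the empty list for k < 0)
    let k_largest := (PySem.List.sorted nums (fun x => x) true).take k.toNat
    let remove_counter := PySem.Dict.counter k_largest
    nums.foldl (fun remaining num =>
      if !(remove_counter.contains num) then remaining + 1 else remaining) 0

-- ===== PORT B =====
-- termination facts for the quickselect recursion (cited in decreasing_by)
theorem pvGetDMem (nums : List Int) (hne : nums ≠ []) : nums.getD (nums.length / 2) 0 ∈ nums := by
  have hidx : nums.length / 2 < nums.length :=
    Nat.div_lt_self (List.length_pos_iff.mpr hne) (by omega)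
  rw [List.getD_eq_getElem nums 0 hidx]
  exact List.getElem_mem hidx

theorem pvAttachFilterLt (nums : List Int) (hne : nums ≠ []) (p : {x // x ∈ nums} → Bool)
    (hp : ∀ h, p ⟨nums.getD (nums.length / 2) 0, h⟩ = false) :
    (nums.attach.filter p).length < nums.length :=
  Nat.lt_of_lt_of_le
    (List.length_filter_lt_length_iff_exists.mpr
      ⟨⟨nums.getD (nums.length / 2) 0, pvGetDMem nums hne⟩, List.mem_attach _ _,
        by simp only [Bool.not_eq_true]; exact hp _⟩)
    (le_of_eq (List.length_attach))

def kthLargest (nums : List Int) (k : Int) : Int :=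
  if hne : nums = [] then 0
  else
    let pivot := nums.getD (nums.length / 2) 0
    let gt := nums.filter (fun x => decide (pivot < x))
    if k ≤ (gt.length : Int) then kthLargest gt k
    else
      let eqCount : Int := nums.countP (fun x => x == pivot)
      if k ≤ (gt.length : Int) + eqCount then pivot
      else
        let lt := nums.filter (fun x => decide (x < pivot))
        kthLargest lt (k - (gt.length : Int) - eqCount)
termination_by nums.length
decreasing_by
  all_goals
    simp only [List.length_unattach]
    apply pvAttachFilterLt nums hne
    intro h
    simp

def remove_k_largest_optimized_alt (nums : List Int) (k : Int) : Int :=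
  if k ≤ 0 then (nums.length : Int)
  else if (nums.length : Int) ≤ k then 0
  else
    let t := kthLargest nums k
    (nums.countP (fun x => decide (x < t)) : Int)   -- sum(1 for x in nums if x < t)

-- ===== PRECONDITION & SPEC =====
def Spec_remove_k_largest_optimized (nums : List Int) (k : Int) (out : Int) : Prop := out = remove_k_largest_optimized_alt nums k
instance (nums : List Int) (k : Int) (out : Int) : Decidable (Spec_remove_k_largest_optimized nums k out) := by unfold Spec_remove_k_largest_optimized; infer_instance

-- ===== CLAIM (what is proved, stated in full; the proofs are below) =====
def Claim_equal_remove_k_largest_optimized : Prop := ∀ (nums : List Int) (k : Int), Dom_remove_k_largest_optimized nums k → Spec_remove_k_largest_optimized nums k (remove_k_largest_optimized nums k)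

-- ===== LEMMAS AND PROOFS =====

theorem pvCountPartition (nums : List Int) (pivot : Int) (p : Int → Bool) :
    nums.countP p = nums.countP (fun x => p x && decide (pivot < x))
      + nums.countP (fun x => p x && (x == pivot))
      + nums.countP (fun x => p x && decide (x < pivot)) := by
  induction nums with
  | nil => simp
  | cons a l ih =>
    simp only [List.countP_cons, Bool.and_eq_true, beq_iff_eq, decide_eq_true_eq]
    rcases lt_trichotomy pivot a with h | h | h <;>
      [ (by_cases hp : p a = true)
      ; (by_cases hp : p a = true)
      ; (by_cases hp : p a = true) ] <;>
      simp [h, hp, not_lt_of_gt, ne_of_gt, ne_of_lt, ih] <;> omega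

theorem pvKSel : ∀ (n : Nat), ∀ (nums : List Int) (k : Int), nums.length ≤ n → 1 ≤ k →
    k ≤ (nums.length : Int) →
    kthLargest nums k ∈ nums ∧
    ((nums.countP (fun x => decide (kthLargest nums k < x)) : Int) < k) ∧
    (k ≤ (nums.countP (fun x => decide (kthLargest nums k ≤ x)) : Int)) := by
  intro n
  induction n with
  | zero =>
    intro nums k hn h1 h2
    exfalso
    have : nums.length = 0 := by omega
    rw [this] at h2
    omega
  | succ n ih =>
    intro nums k hn h1 h2
    have hne : nums ≠ [] := by
      intro h; subst h; simp at h2; omega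
    set pivot := nums.getD (nums.length / 2) 0 with hpiv
    have hpm : pivot ∈ nums := pvGetDMem nums hne
    set gt := nums.filter (fun x => decide (pivot < x)) with hgt
    set eqc := nums.countP (fun x => x == pivot) with heqc
    set lt := nums.filter (fun x => decide (x < pivot)) with hlt
    have hcong : ∀ (p q : Int → Bool), (∀ x ∈ nums, (p x = true ↔ q x = true)) →
        nums.countP p = nums.countP q := fun p q h => List.countP_congr h
    have hGlen : gt.length = nums.countP (fun x => decide (pivot < x)) := List.countP_eq_length_filter.symm
    have hLlen : lt.length = nums.countP (fun x => decide (x < pivot)) := List.countP_eq_length_filter.symm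
    have hGlt : gt.length < nums.length :=
      List.length_filter_lt_length_iff_exists.mpr ⟨pivot, hpm, by simp⟩
    have hLlt : lt.length < nums.length :=
      List.length_filter_lt_length_iff_exists.mpr ⟨pivot, hpm, by simp⟩
    have htotal : nums.length = gt.length + eqc + lt.length := by
      have := pvCountPartition nums pivot (fun _ => true)
      simpa [hGlen, hLlen] using this
    by_cases hk1 : k ≤ (gt.length : Int)
    · -- recurse on gt
      have heq : kthLargest nums k = kthLargest gt k := by
        rw [kthLargest]
        simp only [dif_neg hne, ← hpiv, ← hgt, if_pos hk1]
      rcases ih gt k (by omega) h1 hk1 with ⟨hmem, hc1, hc2⟩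
      rw [heq]
      set r := kthLargest gt k with hr
      have hrnums : r ∈ nums := List.mem_of_mem_filter hmem
      have hrgt : pivot < r := by
        have := List.of_mem_filter hmem
        simpa using this
      refine ⟨hrnums, ?_, ?_⟩
      · have hpart := pvCountPartition nums pivot (fun x => decide (r < x))
        have ht1 : nums.countP (fun x => decide (r < x) && decide (pivot < x))
            = gt.countP (fun x => decide (r < x)) := List.countP_filter.symm
        have ht2 : nums.countP (fun x => decide (r < x) && (x == pivot)) = 0 := by
          rw [List.countP_eq_zero]; intro a _ h; simp at h; omega
        have ht3 : nums.countP (fun x => decide (r < x) && decide (x < pivot)) = 0 := by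
          rw [List.countP_eq_zero]; intro a _ h; simp at h; omega
        omega
      · have hpart := pvCountPartition nums pivot (fun x => decide (r ≤ x))
        have ht1 : nums.countP (fun x => decide (r ≤ x) && decide (pivot < x))
            = gt.countP (fun x => decide (r ≤ x)) := List.countP_filter.symm
        omega
    · by_cases hk2 : k ≤ (gt.length : Int) + eqc
      · -- the pivot is the answer
        have heq : kthLargest nums k = pivot := by
          rw [kthLargest]
          simp only [dif_neg hne, ← hpiv, ← hgt, if_neg hk1, ← heqc, if_pos hk2]
        rw [heq]
        refine ⟨hpm, ?_, ?_⟩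
        · omega
        · have hpart := pvCountPartition nums pivot (fun x => decide (pivot ≤ x))
          have ht1 : nums.countP (fun x => decide (pivot ≤ x) && decide (pivot < x))
              = nums.countP (fun x => decide (pivot < x)) := by
            apply hcong; intro x _; simp; omega
          have ht2 : nums.countP (fun x => decide (pivot ≤ x) && (x == pivot)) = eqc := by
            rw [heqc]; apply hcong; intro x _; simp; omega
          have ht3 : nums.countP (fun x => decide (pivot ≤ x) && decide (x < pivot)) = 0 := by
            rw [List.countP_eq_zero]; intro a _ h; simp at h; omega
          omega
      · -- recurse on lt
        have heq : kthLargest nums k = kthLargest lt (k - (gt.length : Int) - eqc) := by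
          rw [kthLargest]
          simp only [dif_neg hne, ← hpiv, ← hgt, if_neg hk1, ← heqc, if_neg hk2, ← hlt]
        rcases ih lt (k - (gt.length : Int) - eqc) (by omega) (by omega) (by omega)
          with ⟨hmem, hc1, hc2⟩
        rw [heq]
        set r := kthLargest lt (k - (gt.length : Int) - eqc) with hr
        have hrnums : r ∈ nums := List.mem_of_mem_filter hmem
        have hrlt : r < pivot := by
          have := List.of_mem_filter hmem
          simpa using this
        refine ⟨hrnums, ?_, ?_⟩
        · have hpart := pvCountPartition nums pivot (fun x => decide (r < x))
          have ht1 : nums.countP (fun x => decide (r < x) && decide (pivot < x))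
              = nums.countP (fun x => decide (pivot < x)) := by
            apply hcong; intro x _; simp; omega
          have ht2 : nums.countP (fun x => decide (r < x) && (x == pivot)) = eqc := by
            rw [heqc]; apply hcong; intro x _; simp; omega
          have ht3 : nums.countP (fun x => decide (r < x) && decide (x < pivot))
              = lt.countP (fun x => decide (r < x)) := List.countP_filter.symm
          omega
        · have hpart := pvCountPartition nums pivot (fun x => decide (r ≤ x))
          have ht1 : nums.countP (fun x => decide (r ≤ x) && decide (pivot < x))
              = nums.countP (fun x => decide (pivot < x)) := by
            apply hcong; intro x _; simp; omega
          have ht2 : nums.countP (fun x => decide (r ≤ x) && (x == pivot)) = eqc := by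
            rw [heqc]; apply hcong; intro x _; simp; omega
          have ht3 : nums.countP (fun x => decide (r ≤ x) && decide (x < pivot))
              = lt.countP (fun x => decide (r ≤ x)) := List.countP_filter.symm
          omega
theorem pvMemTake (s : List Int) (hp : s.Pairwise (fun a b => b ≤ a)) (kn : Nat)
    (h1 : 1 ≤ kn) (hkn : kn ≤ s.length) (x : Int) (hx : x ∈ s) :
    (x ∈ s.take kn ↔ s[kn - 1]'(by omega) ≤ x) := by
  have mono := List.pairwise_iff_getElem.mp hp
  constructor
  · intro h
    rcases List.mem_take_iff_getElem.mp h with ⟨i, hm, rfl⟩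
    rcases Nat.lt_or_ge i (kn - 1) with hik | hik
    · exact mono i (kn - 1) (by omega) (by omega) hik
    · have : i = kn - 1 := by omega
      subst this
      exact le_refl _
  · intro h
    rcases List.mem_iff_getElem.mp hx with ⟨i, hm, rfl⟩
    rcases Nat.lt_or_ge i kn with hik | hik
    · exact List.mem_take_iff_getElem.mpr ⟨i, by omega, rfl⟩
    · have hle : s[i] ≤ s[kn - 1]'(by omega) := mono (kn - 1) i (by omega) hm (by omega)
      have heq : s[i] = s[kn - 1]'(by omega) := le_antisymm hle h
      rw [heq]
      exact List.mem_take_iff_getElem.mpr ⟨kn - 1, by omega, rfl⟩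

theorem pvUniq (s : List Int) (hp : s.Pairwise (fun a b => b ≤ a)) (j : Nat) (hj : j < s.length)
    (t : Int) (h1 : s.countP (fun x => decide (t < x)) ≤ j)
    (h2 : j < s.countP (fun x => decide (t ≤ x))) :
    s[j] = t := by
  have mono := List.pairwise_iff_getElem.mp hp
  have hsplit : ∀ (p : Int → Bool) (m : Nat),
      s.countP p = (s.take m).countP p + (s.drop m).countP p := by
    intro p m
    conv_lhs => rw [← List.take_append_drop m s]
    rw [List.countP_append]
  have hle : s[j] ≤ t := by
    by_contra hlt
    simp only [not_le] at hlt
    have hall : (s.take (j+1)).countP (fun x => decide (t < x)) = (s.take (j+1)).length := by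
      rw [List.countP_eq_length]
      intro a ha
      rcases List.mem_take_iff_getElem.mp ha with ⟨i, hm, rfl⟩
      have : s[j] ≤ s[i] := by
        rcases Nat.lt_or_ge i j with h | h
        · exact mono i j (by omega) hj h
        · have : i = j := by omega
          subst this; exact le_refl _
      simp; omega
    have hlen : (s.take (j+1)).length = j + 1 := by simp; omega
    have := hsplit (fun x => decide (t < x)) (j+1)
    omega
  have hge : t ≤ s[j] := by
    by_contra hlt
    simp only [not_le] at hlt
    have hzero : (s.drop j).countP (fun x => decide (t ≤ x)) = 0 := by
      rw [List.countP_eq_zero]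
      intro a ha
      rcases List.mem_iff_getElem.mp ha with ⟨i, hm, rfl⟩
      have hm' : j + i < s.length := by simp at hm; omega
      have : (s.drop j)[i] = s[j + i]'hm' := List.getElem_drop
      rw [this]
      have hji : s[j + i]'hm' ≤ s[j] := by
        rcases Nat.lt_or_ge j (j + i) with h | h
        · exact mono j (j + i) hj (by omega) h
        · have hi0 : i = 0 := by omega
          subst hi0
          simp
      simp; omega
    have htlen : (s.take j).countP (fun x => decide (t ≤ x)) ≤ j := by
      calc (s.take j).countP (fun x => decide (t ≤ x)) ≤ (s.take j).length :=
        List.countP_le_length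
      _ ≤ j := by simp
    have := hsplit (fun x => decide (t ≤ x)) j
    omega
  omega

theorem pvMain (nums : List Int) (k : Int) :
    remove_k_largest_optimized nums k = remove_k_largest_optimized_alt nums k := by
  unfold remove_k_largest_optimized remove_k_largest_optimized_alt
  set s := PySem.List.sorted nums (fun x => x) true with hs
  have hperm : s.Perm nums := PySem.List.sorted_perm nums (fun x => x) true
  have hpair : s.Pairwise (fun a b => b ≤ a) := PySem.List.sorted_pairwise_rev nums (fun x => x)
  have hslen : s.length = nums.length := hperm.length_eq
  have hA : ∀ kl : List Int,
      nums.foldl (fun remaining num =>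
        if !((PySem.Dict.counter kl).contains num) then remaining + 1 else remaining) 0
      = (nums.countP (fun x => !decide (x ∈ kl)) : Int) := by
    intro kl
    rw [PySem.List.foldl_count_if]
    simp only [zero_add, Int.natCast_inj]
    apply List.countP_congr
    intro x _
    simp [PySem.Dict.contains_counter]
  rcases lt_trichotomy k 0 with hk | hk | hk
  · -- k < 0 : nlargest is [], everything is kept
    rw [if_neg (by omega), if_pos (by omega), hA]
    have : k.toNat = 0 := by omega
    rw [this]
    simp
  · subst hk
    simp
  · -- 1 ≤ k
    rw [if_neg (by omega), if_neg (by omega)]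
    by_cases hbig : (nums.length : Int) ≤ k
    · rw [if_pos hbig, hA]
      have htake : s.take k.toNat = s := List.take_of_length_le (by omega)
      rw [htake]
      simp only [Int.natCast_eq_zero, List.countP_eq_zero]
      intro a ha
      simp [hperm.mem_iff.mpr ha]
    · rw [if_neg hbig, hA]
      have hkn1 : 1 ≤ k.toNat := by omega
      have hkns : k.toNat ≤ s.length := by omega
      have hj : k.toNat - 1 < s.length := by omega
      set t := s[k.toNat - 1]'hj with ht
      -- the quickselect result is exactly t
      rcases pvKSel nums.length nums k le_rfl (by omega) (by omega) with ⟨_, hc1, hc2⟩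
      have hpcount : ∀ p : Int → Bool, s.countP p = nums.countP p := fun p => hperm.countP_eq p
      have hr : kthLargest nums k = t := by
        have h1' : s.countP (fun x => decide (kthLargest nums k < x)) ≤ k.toNat - 1 := by
          rw [hpcount]; omega
        have h2' : k.toNat - 1 < s.countP (fun x => decide (kthLargest nums k ≤ x)) := by
          rw [hpcount]; omega
        rw [ht]
        exact (pvUniq s hpair (k.toNat - 1) hj _ h1' h2').symm
      rw [hr]
      simp only [Int.natCast_inj]
      apply List.countP_congr
      intro x hx
      have hmt := pvMemTake s hpair k.toNat hkn1 hkns x (hperm.mem_iff.mpr hx)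
      simp only [Bool.not_eq_true', decide_eq_false_iff_not, decide_eq_true_eq] at hmt ⊢
      rw [hmt]
      omega

-- ===== VERDICT (by name: the statement is the Claim_ definition above) =====
theorem remove_k_largest_optimized_spec : Claim_equal_remove_k_largest_optimized := by
  intro nums k _
  unfold Spec_remove_k_largest_optimized
  exact pvMain nums k
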